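-- pv_equiv track=rewrite | github.com/bravovaldes/bravopoultry | backend/app/services/laying_curve.py | get_expected_laying_rate
-- ===== SOURCE A (Python) =====
-- from typing import Optional, Dict, Tuple
--
-- LAYING_CURVE: Dict[Tuple[int, int], Tuple[float, float, float]] = {
--     (0, 17): (0, 0, 0),           # Pre-lay: no eggs
--     (18, 18): (0, 10, 5),         # Week 18: first eggs
--     (19, 19): (5, 25, 15),        # Week 19: starting
--     (20, 20): (20, 50, 35),       # Week 20: rising
--     (21, 21): (40, 70, 55),       # Week 21: rising
--     (22, 22): (55, 80, 70),       # Week 22: rising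
--     (23, 23): (70, 88, 80),       # Week 23: approaching peak
--     (24, 24): (80, 92, 88),       # Week 24: near peak
--     (25, 26): (85, 95, 92),       # Week 25-26: peak
--     (27, 30): (88, 96, 94),       # Week 27-30: peak plateau
--     (31, 35): (85, 94, 91),       # Week 31-35: early post-peak
--     (36, 40): (82, 92, 88),       # Week 36-40: post-peak
--     (41, 45): (78, 88, 84),       # Week 41-45: decline
--     (46, 50): (72, 84, 79),       # Week 46-50: decline
--     (51, 55): (65, 78, 72),       # Week 51-55: late cycle
--     (56, 60): (58, 72, 66),       # Week 56-60: late cycle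
--     (61, 70): (50, 68, 60),       # Week 61-70: end of cycle
--     (71, 100): (40, 60, 50),      # 71+ weeks: very late
-- }
--
-- def get_expected_laying_rate(age_weeks: int) -> Dict:
--     """
--     Get expected laying rate for a given age in weeks.
--     Returns min, max, and optimal expected rates.
--     """
--     for (min_week, max_week), (min_rate, max_rate, optimal) in LAYING_CURVE.items():
--         if min_week <= age_weeks <= max_week:
--             return {
--                 "min_expected": min_rate,
--                 "max_expected": max_rate,
--                 "optimal_expected": optimal,
--                 "age_weeks": age_weeks
--             }
--
--     # Default for very old flocks
--     return {
--         "min_expected": 30,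
--         "max_expected": 50,
--         "optimal_expected": 40,
--         "age_weeks": age_weeks
--     }
-- ===== SOURCE B (Python) =====
-- import bisect
--
-- _UPPERS = [17, 18, 19, 20, 21, 22, 23, 24, 26, 30, 35, 40, 45, 50, 55, 60, 70, 100]
-- _RATES = [(0, 0, 0), (0, 10, 5), (5, 25, 15), (20, 50, 35), (40, 70, 55),
--           (55, 80, 70), (70, 88, 80), (80, 92, 88), (85, 95, 92), (88, 96, 94),
--           (85, 94, 91), (82, 92, 88), (78, 88, 84), (72, 84, 79), (65, 78, 72),
--           (58, 72, 66), (50, 68, 60), (40, 60, 50)]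
--
-- def get_expected_laying_rate(age_weeks):
--     if age_weeks < 0 or age_weeks > 100:
--         mn, mx, opt = 30, 50, 40
--     else:
--         i = bisect.bisect_left(_UPPERS, age_weeks)
--         mn, mx, opt = _RATES[i]
--     return {
--         "min_expected": mn,
--         "max_expected": mx,
--         "optimal_expected": opt,
--         "age_weeks": age_weeks
--     }
-- ===== Notes on version B (the rewrite author's own statement) =====
-- stated objective: idiomatic
-- what changed: Replaced the linear scan over the interval dict by a range guard plus bisect_left binary search on a precomputed sorted list of interval upper bounds with a parallel rate table.
import Mathlib
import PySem

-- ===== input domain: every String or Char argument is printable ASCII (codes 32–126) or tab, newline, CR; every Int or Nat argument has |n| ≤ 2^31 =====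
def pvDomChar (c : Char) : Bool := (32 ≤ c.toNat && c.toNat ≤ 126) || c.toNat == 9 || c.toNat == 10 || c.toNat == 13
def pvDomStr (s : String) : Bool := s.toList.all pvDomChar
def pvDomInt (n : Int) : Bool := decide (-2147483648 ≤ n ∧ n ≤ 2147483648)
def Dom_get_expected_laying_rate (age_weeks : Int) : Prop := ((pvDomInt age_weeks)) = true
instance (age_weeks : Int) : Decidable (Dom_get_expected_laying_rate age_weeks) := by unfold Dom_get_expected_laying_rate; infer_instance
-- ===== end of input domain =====

-- B replaces A's linear scan over the interval dict by one range guard plus a binary search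
-- (bisect_left) over a precomputed list of interval upper bounds (objective: idiomatic).

-- ===== PORT A =====
-- the LAYING_CURVE dict as an association list in insertion order
def LAYING_CURVE : List ((Int × Int) × (Int × Int × Int)) :=
  [((0, 17), (0, 0, 0)), ((18, 18), (0, 10, 5)), ((19, 19), (5, 25, 15)),
   ((20, 20), (20, 50, 35)), ((21, 21), (40, 70, 55)), ((22, 22), (55, 80, 70)),
   ((23, 23), (70, 88, 80)), ((24, 24), (80, 92, 88)), ((25, 26), (85, 95, 92)),
   ((27, 30), (88, 96, 94)), ((31, 35), (85, 94, 91)), ((36, 40), (82, 92, 88)),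
   ((41, 45), (78, 88, 84)), ((46, 50), (72, 84, 79)), ((51, 55), (65, 78, 72)),
   ((56, 60), (58, 72, 66)), ((61, 70), (50, 68, 60)), ((71, 100), (40, 60, 50))]

-- A's for-loop over LAYING_CURVE.items(): first matching interval returns, fall through to default
def aScan (age_weeks : Int) : List ((Int × Int) × (Int × Int × Int)) → List (String × Int)
  | [] =>
      [("min_expected", 30), ("max_expected", 50), ("optimal_expected", 40), ("age_weeks", age_weeks)]
  | ((min_week, max_week), (min_rate, max_rate, optimal)) :: rest =>
      if min_week ≤ age_weeks ∧ age_weeks ≤ max_week then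
        [("min_expected", min_rate), ("max_expected", max_rate),
         ("optimal_expected", optimal), ("age_weeks", age_weeks)]
      else aScan age_weeks rest

def get_expected_laying_rate (age_weeks : Int) : List (String × Int) :=
  aScan age_weeks LAYING_CURVE

-- ===== PORT B =====
def UPPERS : List Int := [17, 18, 19, 20, 21, 22, 23, 24, 26, 30, 35, 40, 45, 50, 55, 60, 70, 100]

def RATES : List (Int × Int × Int) :=
  [(0, 0, 0), (0, 10, 5), (5, 25, 15), (20, 50, 35), (40, 70, 55),
   (55, 80, 70), (70, 88, 80), (80, 92, 88), (85, 95, 92), (88, 96, 94),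
   (85, 94, 91), (82, 92, 88), (78, 88, 84), (72, 84, 79), (65, 78, 72),
   (58, 72, 66), (50, 68, 60), (40, 60, 50)]

def get_expected_laying_rate_alt (age_weeks : Int) : List (String × Int) :=
  let r :=
    if age_weeks < 0 ∨ age_weeks > 100 then (30, 50, 40)
    else RATES.getD (PySem.List.bisectLeft UPPERS age_weeks) (0, 0, 0)
  [("min_expected", r.1), ("max_expected", r.2.1),
   ("optimal_expected", r.2.2), ("age_weeks", age_weeks)]

-- ===== PRECONDITION & SPEC =====
def Spec_get_expected_laying_rate (age_weeks : Int) (out : List (String × Int)) : Prop := out = get_expected_laying_rate_alt age_weeks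
instance (age_weeks : Int) (out : List (String × Int)) : Decidable (Spec_get_expected_laying_rate age_weeks out) := by unfold Spec_get_expected_laying_rate; infer_instance

-- ===== CLAIM (what is proved, stated in full; the proofs are below) =====
def Claim_equal_get_expected_laying_rate : Prop := ∀ (age_weeks : Int), Dom_get_expected_laying_rate age_weeks → Spec_get_expected_laying_rate age_weeks (get_expected_laying_rate age_weeks)

-- ===== LEMMAS AND PROOFS =====

-- when no interval matches, A's scan falls through to the default record
lemma aScan_default (a : Int) (l : List ((Int × Int) × (Int × Int × Int)))
    (h : ∀ p ∈ l, ¬(p.1.1 ≤ a ∧ a ≤ p.1.2)) :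
    aScan a l =
      [("min_expected", 30), ("max_expected", 50), ("optimal_expected", 40), ("age_weeks", a)] := by
  induction l with
  | nil => rfl
  | cons p rest ih =>
      obtain ⟨⟨mn, mx⟩, ⟨r1, r2, r3⟩⟩ := p
      simp only [aScan]
      rw [if_neg (h _ (List.mem_cons_self))]
      exact ih fun q hq => h q (List.mem_cons_of_mem _ hq)

-- outside 0..100 both programs return the default record
lemma eq_outside (a : Int) (h : a < 0 ∨ a > 100) :
    get_expected_laying_rate a = get_expected_laying_rate_alt a := by
  rw [get_expected_laying_rate,
    aScan_default a _ (by intro p hp; fin_cases hp <;> dsimp <;> omega)]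
  rw [get_expected_laying_rate_alt, if_pos h]

-- inside 0..100 the two tables agree, checked case by case
lemma eq_inside (a : Int) (h0 : 0 ≤ a) (h1 : a ≤ 100) :
    get_expected_laying_rate a = get_expected_laying_rate_alt a := by
  interval_cases a <;> decide

-- ===== VERDICT (by name: the statement is the Claim_ definition above) =====
theorem get_expected_laying_rate_spec : Claim_equal_get_expected_laying_rate := by
  intro a _
  unfold Spec_get_expected_laying_rate
  rcases lt_or_ge a 0 with h | h
  · exact eq_outside a (Or.inl h)
  · rcases le_or_gt a 100 with h1 | h1
    · exact eq_inside a h h1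
    · exact eq_outside a (Or.inr h1)
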